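-- pv_equiv track=rewrite | github.com/ylow/aoc2023 | day12/12a.py | sprcount
-- ===== SOURCE A (Python) =====
-- def sprcount(l):
--     c = []
--     ctr = 0
--     for i in l:
--         if i == '#':
--             ctr += 1
--         elif ctr > 0:
--             c.append(ctr)
--             ctr = 0
--     if ctr:
--         c.append(ctr)
--     return c
-- ===== SOURCE B (Python) =====
-- def sprcount(l):
--     s = list(l)
--     n = len(s)
--     starts = [i for i in range(n) if s[i] == '#' and (i == 0 or s[i - 1] != '#')]
--     ends = [i for i in range(n) if s[i] == '#' and (i == n - 1 or s[i + 1] != '#')]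
--     return [e - b + 1 for b, e in zip(starts, ends)]
-- ===== Notes on version B (the rewrite author's own statement) =====
-- stated objective: alternative
-- what changed: Instead of a single-pass counter/flush accumulator, B locates run boundaries positionally: two index comprehensions collect the start indices and end indices of maximal '#'-runs, and the result is the zip of end-start+1 differences.
import Mathlib
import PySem

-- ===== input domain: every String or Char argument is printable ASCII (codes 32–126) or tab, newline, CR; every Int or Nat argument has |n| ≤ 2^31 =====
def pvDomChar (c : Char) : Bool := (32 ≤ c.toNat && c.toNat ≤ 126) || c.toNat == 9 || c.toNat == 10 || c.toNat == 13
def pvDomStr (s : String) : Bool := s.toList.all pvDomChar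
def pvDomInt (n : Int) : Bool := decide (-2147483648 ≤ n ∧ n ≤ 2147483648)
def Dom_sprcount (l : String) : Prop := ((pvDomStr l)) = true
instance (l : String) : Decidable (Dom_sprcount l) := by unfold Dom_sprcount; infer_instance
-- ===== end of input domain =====

set_option maxRecDepth 8000


-- B replaces A's counter/flush accumulator loop by a positional computation: it collects the
-- start indices and the end indices of maximal '#'-runs and zips them into end-start+1 lengths;
-- an alternative of the same cost.

-- ===== PORT A =====
-- A's for-loop over state (c, ctr), then the trailing 'if ctr: c.append(ctr)'.
def sprcount (l : String) : List Int :=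
  let st := l.toList.foldl
    (fun (p : List Int × Int) i =>
      if i = '#' then (p.1, p.2 + 1)
      else if p.2 > 0 then (p.1 ++ [p.2], 0)
      else p)
    ([], 0)
  if st.2 ≠ 0 then st.1 ++ [st.2] else st.1

-- ===== PORT B =====
-- 'starts = [i for i in range(n) if s[i]=="#" and (i==0 or s[i-1]!="#")]', same for ends,
-- '[e - b + 1 for b, e in zip(starts, ends)]'.  All indices i, i-1, i+1 read in range
-- (guarded by the 'i == 0' / 'i == n-1' disjuncts or out of range only when the disjunct
-- already decided), so List.getD with a dummy default is exact here.
def sprcount_alt (l : String) : List Int :=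
  let s := l.toList
  let n := s.length
  let starts := (List.range n).filter
    (fun i => s.getD i ' ' == '#' && (i == 0 || !(s.getD (i - 1) ' ' == '#')))
  let ends := (List.range n).filter
    (fun i => s.getD i ' ' == '#' && (i == n - 1 || !(s.getD (i + 1) ' ' == '#')))
  List.zipWith (fun (b e : Nat) => ((e : Int) - (b : Int) + 1)) starts ends

-- ===== PRECONDITION & SPEC =====
def Spec_sprcount (l : String) (out : List Int) : Prop := out = sprcount_alt l
instance (l : String) (out : List Int) : Decidable (Spec_sprcount l out) := by unfold Spec_sprcount; infer_instance

-- ===== CLAIM (what is proved, stated in full; the proofs are below) =====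
def Claim_equal_sprcount : Prop := ∀ (l : String), Dom_sprcount l → Spec_sprcount l (sprcount l)

-- ===== LEMMAS AND PROOFS =====

-- Reference spec: run-length counts with a pending counter.
def pvCount : List Char → Int → List Int
  | [], ctr => if ctr ≠ 0 then [ctr] else []
  | c :: cs, ctr =>
    if c = '#' then pvCount cs (ctr + 1)
    else if ctr > 0 then ctr :: pvCount cs 0
    else pvCount cs 0

-- Recursive characterisation of B's two index filters: pvStarts carries the previous character.
def pvStarts (p : Char) : List Char → List Nat
  | [] => []
  | c :: t => (if c = '#' ∧ p ≠ '#' then [0] else []) ++ (pvStarts c t).map (· + 1)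

def pvEnds : List Char → List Nat
  | [] => []
  | c :: t => (if c = '#' ∧ t.headD ' ' ≠ '#' then [0] else []) ++ (pvEnds t).map (· + 1)

theorem startsFilter (t : List Char) : ∀ (p : Char),
    (List.range t.length).filter
        (fun i => t.getD i ' ' == '#' && !((if i = 0 then p else t.getD (i - 1) ' ') == '#'))
      = pvStarts p t := by
  induction t with
  | nil => intro p; simp [pvStarts]
  | cons c u ih =>
    intro p
    rw [List.length_cons, List.range_succ_eq_map, List.filter_cons, List.filter_map]
    have hshift :
        (List.range u.length).filter
            ((fun i => (c :: u).getD i ' ' == '#'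
                && !((if i = 0 then p else (c :: u).getD (i - 1) ' ') == '#')) ∘ Nat.succ)
          = (List.range u.length).filter
            (fun i => u.getD i ' ' == '#' && !((if i = 0 then c else u.getD (i - 1) ' ') == '#')) := by
      apply List.filter_congr
      intro i _
      rcases i with _ | j
      · simp
      · simp
    rw [hshift, ih c, pvStarts]
    by_cases hc : c = '#' <;> by_cases hp : p = '#' <;> simp [hc, hp]

theorem endsFilter (t : List Char) :
    (List.range t.length).filter
        (fun i => t.getD i ' ' == '#' && !(t.getD (i + 1) ' ' == '#'))
      = pvEnds t := by
  induction t with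
  | nil => simp [pvEnds]
  | cons c u ih =>
    rw [List.length_cons, List.range_succ_eq_map, List.filter_cons, List.filter_map]
    have hshift :
        (List.range u.length).filter
            ((fun i => (c :: u).getD i ' ' == '#' && !((c :: u).getD (i + 1) ' ' == '#')) ∘ Nat.succ)
          = (List.range u.length).filter
            (fun i => u.getD i ' ' == '#' && !(u.getD (i + 1) ' ' == '#')) := by
      apply List.filter_congr
      intro i _
      simp [Nat.succ_eq_add_one]
    rw [hshift, ih, pvEnds]
    cases u with
    | nil => by_cases hc : c = '#' <;> simp [hc]
    | cons d v => by_cases hc : c = '#' <;> by_cases hd : d = '#' <;> simp [hc, hd]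

-- B's literal predicates coincide with the generalized ones at the top level.
theorem alt_eq_zip (l : String) :
    sprcount_alt l
      = List.zipWith (fun (b e : Nat) => ((e : Int) - (b : Int) + 1))
          (pvStarts ' ' l.toList) (pvEnds l.toList) := by
  unfold sprcount_alt
  set s := l.toList with hs
  have h1 :
      (List.range s.length).filter
          (fun i => s.getD i ' ' == '#' && (i == 0 || !(s.getD (i - 1) ' ' == '#')))
        = (List.range s.length).filter
          (fun i => s.getD i ' ' == '#' && !((if i = 0 then ' ' else s.getD (i - 1) ' ') == '#')) := by
    apply List.filter_congr
    intro i _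
    rcases i with _ | j <;> simp
  have h2 :
      (List.range s.length).filter
          (fun i => s.getD i ' ' == '#' && (i == s.length - 1 || !(s.getD (i + 1) ' ' == '#')))
        = (List.range s.length).filter
          (fun i => s.getD i ' ' == '#' && !(s.getD (i + 1) ' ' == '#')) := by
    apply List.filter_congr
    intro i hi
    rw [List.mem_range] at hi
    by_cases hlast : i = s.length - 1
    · have hle : s.length ≤ i + 1 := by omega
      have hd : s[i + 1]?.getD ' ' = ' ' := by
        rw [List.getElem?_eq_none hle]; rfl
      have ht : (i == s.length - 1) = true := by simpa using hlast
      simp [ht, hd]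
    · have hne : (i == s.length - 1) = false := by simpa using hlast
      simp [hne]
  simp only [h1, h2, startsFilter, endsFilter]

-- pvStarts ignores its previous-character argument when the list does not begin with '#'.
theorem pvStarts_indep (r : List Char) (h : r.headD ' ' ≠ '#') (p q : Char) :
    pvStarts p r = pvStarts q r := by
  cases r with
  | nil => rfl
  | cons d u =>
    have hd : d ≠ '#' := by simpa using h
    simp [pvStarts, hd]

theorem pvStarts_run (r : List Char) : ∀ (k : Nat),
    pvStarts '#' (List.replicate k '#' ++ r) = (pvStarts '#' r).map (· + k) := by
  intro k
  induction k with
  | zero => simp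
  | succ k ih =>
    rw [List.replicate_succ, List.cons_append, pvStarts, ih]
    simp [List.map_map]

theorem pvStarts_run_head (r : List Char) (p : Char) (hp : p ≠ '#') :
    ∀ (k : Nat), 1 ≤ k →
    pvStarts p (List.replicate k '#' ++ r) = 0 :: (pvStarts '#' r).map (· + k) := by
  intro k hk
  obtain ⟨k', rfl⟩ : ∃ k', k = k' + 1 := ⟨k - 1, by omega⟩
  rw [List.replicate_succ, List.cons_append, pvStarts, pvStarts_run r k']
  simp [hp, List.map_map]

theorem pvEnds_run (r : List Char) (h : r.headD ' ' ≠ '#') : ∀ (k : Nat), 1 ≤ k →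
    pvEnds (List.replicate k '#' ++ r) = (k - 1) :: (pvEnds r).map (· + k) := by
  intro k hk
  induction k with
  | zero => omega
  | succ k ih =>
    rcases Nat.eq_or_lt_of_le hk with h1 | h1
    · have hk0 : k = 0 := by omega
      subst hk0
      rw [show List.replicate (0 + 1) '#' ++ r = '#' :: r from rfl, pvEnds,
        if_pos ⟨rfl, h⟩, List.singleton_append]
    · have hk1 : 1 ≤ k := by omega
      rw [List.replicate_succ, List.cons_append, pvEnds, ih hk1]
      have hhd : (List.replicate k '#' ++ r).headD ' ' = '#' := by
        obtain ⟨k', rfl⟩ : ∃ k', k = k' + 1 := ⟨k - 1, by omega⟩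
        rfl
      rw [if_neg (fun hcon => hcon.2 hhd), List.nil_append, List.map_cons, List.map_map]
      congr 1
      omega

-- pvCount over a '#'-run just accumulates into the counter.
theorem pvCount_repl (r : List Char) : ∀ (k : Nat) (j : Int),
    pvCount (List.replicate k '#' ++ r) j = pvCount r (j + k) := by
  intro k
  induction k with
  | zero => simp
  | succ k ih =>
    intro j
    rw [List.replicate_succ, List.cons_append, pvCount, if_pos rfl, ih]
    congr 1
    omega

theorem pvCount_pos_head (r : List Char) (h : r.headD ' ' ≠ '#') (k : Int) (hk : 0 < k) :
    pvCount r k = k :: pvCount r 0 := by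
  cases r with
  | nil => simp [pvCount]; omega
  | cons d u =>
    have hd : d ≠ '#' := by simpa using h
    simp [pvCount, hd, hk]

-- Main: the zip of run boundaries is the run-length list.
theorem zip_eq_count : ∀ (n : Nat) (s : List Char), s.length ≤ n → ∀ (p : Char), p ≠ '#' →
    List.zipWith (fun (b e : Nat) => ((e : Int) - (b : Int) + 1)) (pvStarts p s) (pvEnds s)
      = pvCount s 0 := by
  intro n
  induction n with
  | zero =>
    intro s hs p hp
    have : s = [] := List.eq_nil_of_length_eq_zero (by omega)
    subst this
    simp [pvStarts, pvEnds, pvCount]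
  | succ n ih =>
    intro s hs p hp
    cases s with
    | nil => simp [pvStarts, pvEnds, pvCount]
    | cons c t =>
      by_cases hc : c = '#'
      · subst hc
        -- peel off the whole maximal run: '#' :: t = replicate (k0+1) '#' ++ r
        set k0 := (t.takeWhile (· = '#')).length with hk0
        set r := t.dropWhile (· = '#') with hr
        have htw : t.takeWhile (· = '#') = List.replicate k0 '#' := by
          rw [hk0]
          exact List.eq_replicate_of_mem (fun b hb => by
            have := List.mem_takeWhile_imp hb
            simpa using this)
        have hsplit : '#' :: t = List.replicate (k0 + 1) '#' ++ r := by
          rw [List.replicate_succ, List.cons_append]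
          congr 1
          conv_lhs => rw [← List.takeWhile_append_dropWhile (p := (· = '#')) (l := t)]
          rw [htw, hr]
        have hhead : r.headD ' ' ≠ '#' := by
          cases hcr : r with
          | nil => simp
          | cons d u =>
            have := List.head?_dropWhile_not (· = '#') t
            rw [← hr, hcr] at this
            simpa using this
        have hlen : r.length ≤ n := by
          have h1 : r.length ≤ t.length := by
            rw [hr]; exact List.length_dropWhile_le _ _
          simp at hs
          omega
        rw [hsplit, pvStarts_run_head r p hp (k0 + 1) (by omega),
          pvEnds_run r hhead (k0 + 1) (by omega),
          pvCount_repl r (k0 + 1) 0, pvCount_pos_head r hhead _ (by omega)]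
        rw [List.zipWith_cons_cons, List.zipWith_map_left, List.zipWith_map_right]
        have hfun :
            (fun (a b : Nat) => ((b + (k0 + 1) : Nat) : Int) - ((a + (k0 + 1) : Nat) : Int) + 1)
              = (fun (a b : Nat) => ((b : Int) - (a : Int) + 1)) := by
          funext a b
          push_cast
          ring
        rw [hfun, pvStarts_indep r hhead '#' ' ', ih r hlen ' ' (by decide)]
        congr 1
        push_cast
        omega
      · -- a non-'#' head is skipped by both sides
        rw [pvStarts, pvEnds]
        have hsimp : (if c = '#' ∧ p ≠ '#' then ([0] : List Nat) else []) = [] := by simp [hc]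
        have hsimp2 : (if c = '#' ∧ t.headD ' ' ≠ '#' then ([0] : List Nat) else []) = [] := by
          simp [hc]
        rw [hsimp, hsimp2, List.nil_append, List.nil_append,
          List.zipWith_map_left, List.zipWith_map_right]
        have hfun :
            (fun (a b : Nat) => ((b + 1 : Nat) : Int) - ((a + 1 : Nat) : Int) + 1)
              = (fun (a b : Nat) => ((b : Int) - (a : Int) + 1)) := by
          funext a b
          push_cast
          ring
        rw [hfun, ih t (by simp at hs; omega) c hc]
        simp [pvCount, hc]

-- A's fold realises pvCount.
theorem a_loop (cs : List Char) : ∀ (acc : List Int) (ctr : Int), 0 ≤ ctr →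
    (let st := cs.foldl
        (fun (p : List Int × Int) i =>
          if i = '#' then (p.1, p.2 + 1)
          else if p.2 > 0 then (p.1 ++ [p.2], 0)
          else p)
        (acc, ctr)
      if st.2 ≠ 0 then st.1 ++ [st.2] else st.1)
      = acc ++ pvCount cs ctr := by
  induction cs with
  | nil =>
    intro acc ctr h
    simp only [List.foldl_nil, pvCount]
    split_ifs <;> simp
  | cons c cs ih =>
    intro acc ctr h
    by_cases hc : c = '#'
    · subst hc
      simp only [List.foldl_cons, pvCount]
      exact ih acc (ctr + 1) (by omega)
    · by_cases hp : ctr > 0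
      · simp only [List.foldl_cons, if_neg hc, if_pos hp, pvCount]
        rw [ih (acc ++ [ctr]) 0 (by omega)]
        simp
      · have hz : ctr = 0 := by omega
        subst hz
        simp only [List.foldl_cons, if_neg hc, pvCount]
        simpa using ih acc 0 (by omega)

-- ===== VERDICT (by name: the statement is the Claim_ definition above) =====
theorem sprcount_spec : Claim_equal_sprcount := by
  intro l _
  unfold Spec_sprcount
  rw [alt_eq_zip, zip_eq_count l.toList.length l.toList le_rfl ' ' (by decide)]
  unfold sprcount
  simpa using a_loop l.toList [] 0 (by omega)
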